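-- pv_equiv track=rewrite | github.com/dan-simms1/hymer-connect-ha | scripts/generate_cleanroom_registry.py | _normalize_js_literal
-- ===== SOURCE A (Python) =====
-- def _normalize_js_literal(text: str) -> str:
--     """Convert a JS-like literal subset into something ast.literal_eval accepts."""
--     out: list[str] = []
--     token: list[str] = []
--     quote: str | None = None
--     escape = False
--
--     def flush_token() -> None:
--         if not token:
--             return
--         value = "".join(token)
--         if value == "true":
--             out.append("True")
--         elif value == "false":
--             out.append("False")
--         elif value == "null":
--             out.append("None")
--         else:
--             out.append(value)
--         token.clear()
--
--     for char in text:
--         if quote is not None: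
--             out.append(char)
--             if escape:
--                 escape = False
--             elif char == "\\":
--                 escape = True
--             elif char == quote:
--                 quote = None
--             continue
--
--         if char in {"'", '"'}:
--             flush_token()
--             quote = char
--             out.append(char)
--             continue
--
--         if char.isalnum() or char == "_":
--             token.append(char)
--             continue
--
--         flush_token()
--         out.append(char)
--
--     flush_token()
--     return "".join(out)
-- ===== SOURCE B (Python) =====
-- def _normalize_js_literal(text: str) -> str:
--     """Convert a JS-like literal subset into something ast.literal_eval accepts."""
--     repl = {"true": "True", "false": "False", "null": "None"}
--     out = []
--     i = 0
--     n = len(text)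
--     while i < n:
--         ch = text[i]
--         if ch in "'\"":
--             j = i + 1
--             while j < n:
--                 if text[j] == "\\":
--                     j += 2
--                 elif text[j] == ch:
--                     j += 1
--                     break
--                 else:
--                     j += 1
--             out.append(text[i:j])
--             i = min(j, n)
--         elif ch.isalnum() or ch == "_":
--             j = i + 1
--             while j < n and (text[j].isalnum() or text[j] == "_"):
--                 j += 1
--             word = text[i:j]
--             out.append(repl.get(word, word))
--             i = j
--         else:
--             out.append(ch)
--             i += 1
--     return "".join(out)
-- ===== Notes on version B (the rewrite author's own statement) =====
-- stated objective: alternative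
-- what changed: Replaced the per-character state machine (quote/escape flags plus a pending-token buffer flushed on boundaries) by an index-based chunk scanner that consumes a whole quoted string or a whole word run per step and substitutes keywords via a dict lookup.
import Mathlib
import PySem

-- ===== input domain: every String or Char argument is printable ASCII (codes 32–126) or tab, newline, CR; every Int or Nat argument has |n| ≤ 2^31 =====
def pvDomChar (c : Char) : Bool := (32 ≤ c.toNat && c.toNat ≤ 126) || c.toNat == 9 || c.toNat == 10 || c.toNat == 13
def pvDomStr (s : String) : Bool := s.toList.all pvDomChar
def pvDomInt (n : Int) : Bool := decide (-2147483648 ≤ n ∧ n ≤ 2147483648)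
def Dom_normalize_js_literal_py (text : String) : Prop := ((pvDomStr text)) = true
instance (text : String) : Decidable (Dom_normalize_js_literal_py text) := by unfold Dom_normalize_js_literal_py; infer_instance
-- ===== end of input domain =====

-- B replaces A's per-character quote/escape/token state machine by a chunk scanner: it
-- consumes a whole quoted string or a whole word run per step (alternative, same cost).

-- ===== PORT A =====
-- flush_token: map a pending token and append it to out (no-op for empty token)
def pvFlushA (out tok : List Char) : List Char :=
  if tok = [] then out
  else if tok = "true".toList then out ++ "True".toList
  else if tok = "false".toList then out ++ "False".toList
  else if tok = "null".toList then out ++ "None".toList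
  else out ++ tok

-- one iteration of A's for-loop; state = (out, token, quote, escape)
def pvStepA (st : List Char × List Char × Option Char × Bool) (c : Char) :
    List Char × List Char × Option Char × Bool :=
  match st with
  | (out, tok, some q, esc) =>
    let out := out ++ [c]
    if esc then (out, tok, some q, false)
    else if c = '\\' then (out, tok, some q, true)
    else if c = q then (out, tok, none, false)
    else (out, tok, some q, false)
  | (out, tok, none, esc) =>
    if c = '\'' ∨ c = '"' then (pvFlushA out tok ++ [c], [], some c, false)
    else if PySem.Chars.isalnum c || c = '_' then (out, tok ++ [c], none, esc)
    else (pvFlushA out tok ++ [c], [], none, esc)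

def normalize_js_literal_py (text : String) : String :=
  let st := text.toList.foldl pvStepA ([], [], none, false)
  String.ofList (pvFlushA st.1 st.2.1)

-- ===== PORT B =====
def pvWordB (c : Char) : Bool := PySem.Chars.isalnum c || c = '_'

-- B's inner string scan: from just after the opening quote q, consume up to and including
-- the closing quote (a backslash consumes the next char, as B's `j += 2`); returns (chunk, rest)
def pvScanStrB (q : Char) : List Char → List Char × List Char
  | [] => ([], [])
  | c :: rest =>
    if c = '\\' then
      match rest with
      | [] => ([c], [])
      | d :: rest' => ((pvScanStrB q rest').1.cons d |>.cons c, (pvScanStrB q rest').2)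
    else if c = q then ([c], rest)
    else ((pvScanStrB q rest).1.cons c, (pvScanStrB q rest).2)

-- repl.get(word, word)
def pvReplB (w : List Char) : List Char :=
  if w = "true".toList then "True".toList
  else if w = "false".toList then "False".toList
  else if w = "null".toList then "None".toList
  else w

theorem pvScanStrB_snd_le (q : Char) (cs : List Char) :
    (pvScanStrB q cs).2.length ≤ cs.length := by
  fun_induction pvScanStrB q cs <;> simp_all <;> omega

-- B's main while-loop over the remaining input
def pvGoB : List Char → List Char
  | [] => []
  | c :: rest =>
    if c = '\'' ∨ c = '"' then
      let p := pvScanStrB c rest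
      c :: (p.1 ++ pvGoB p.2)
    else if pvWordB c then
      pvReplB (c :: rest.takeWhile pvWordB) ++ pvGoB (rest.dropWhile pvWordB)
    else c :: pvGoB rest
termination_by cs => cs.length
decreasing_by
  · have := pvScanStrB_snd_le c rest; simp; omega
  · have := rest.length_dropWhile_le pvWordB; simp; omega
  · simp

def normalize_js_literal_py_alt (text : String) : String :=
  String.ofList (pvGoB text.toList)

-- ===== PRECONDITION & SPEC =====
def Spec_normalize_js_literal_py (text : String) (out : String) : Prop := out = normalize_js_literal_py_alt text
instance (text : String) (out : String) : Decidable (Spec_normalize_js_literal_py text out) := by unfold Spec_normalize_js_literal_py; infer_instance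

-- ===== CLAIM (what is proved, stated in full; the proofs are below) =====
def Claim_equal_normalize_js_literal_py : Prop := ∀ (text : String), Dom_normalize_js_literal_py text → Spec_normalize_js_literal_py text (normalize_js_literal_py text)

-- ===== LEMMAS AND PROOFS =====

-- B with a pending word-token carried along (proof-only bridge between A's token buffer and B's word runs)
def pvReplB' (tok : List Char) : List Char := if tok = [] then [] else pvReplB tok

def pvGoB' (tok : List Char) : List Char → List Char
  | [] => pvReplB' tok
  | c :: rest =>
    if c = '\'' ∨ c = '"' then
      let p := pvScanStrB c rest
      pvReplB' tok ++ c :: (p.1 ++ pvGoB' [] p.2)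
    else if pvWordB c then pvGoB' (tok ++ [c]) rest
    else pvReplB' tok ++ c :: pvGoB' [] rest
termination_by cs => cs.length
decreasing_by
  · have := pvScanStrB_snd_le c rest; simp; omega
  · simp
  · simp

def pvFinA (st : List Char × List Char × Option Char × Bool) : List Char :=
  pvFlushA st.1 st.2.1

theorem pvFlushA_eq (out tok : List Char) : pvFlushA out tok = out ++ pvReplB' tok := by
  simp only [pvFlushA, pvReplB', pvReplB]
  split_ifs <;> simp_all

-- the string-state lemma: A's fold while inside a quote equals B's string scan
theorem pvStr_lemma (n : Nat) : ∀ cs : List Char, cs.length ≤ n → ∀ (out tok : List Char) (q : Char),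
    pvFinA (List.foldl pvStepA (out, tok, some q, false) cs)
      = pvFinA (List.foldl pvStepA (out ++ (pvScanStrB q cs).1, tok, none, false) (pvScanStrB q cs).2) := by
  induction n with
  | zero =>
    intro cs h out tok q
    have : cs = [] := List.eq_nil_of_length_eq_zero (Nat.le_zero.mp h)
    subst this; simp [pvScanStrB, pvFinA]
  | succ n ih =>
    intro cs h out tok q
    match cs with
    | [] => simp [pvScanStrB, pvFinA]
    | c :: rest =>
      simp only [List.foldl_cons, pvStepA, if_neg Bool.false_ne_true]
      by_cases hb : c = '\\'
      · subst hb
        match rest with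
        | [] => simp [pvScanStrB, pvFinA]
        | d :: rest' =>
          rw [pvScanStrB.eq_def]
          simp only [List.foldl_cons, pvStepA]
          have h' : rest'.length ≤ n := by simp at h; omega
          have := ih rest' h' (out ++ ['\\'] ++ [d]) tok q
          simpa [List.append_assoc] using this
      · by_cases hq : c = q
        · subst hq
          rw [pvScanStrB.eq_def]
          simp [hb]
        · rw [pvScanStrB.eq_def]
          simp only [if_neg hb, if_neg hq]
          have h' : rest.length ≤ n := by simp at h; omega
          have := ih rest h' (out ++ [c]) tok q
          simpa [List.append_assoc] using this

-- the main lemma: A's fold outside a quote equals B with a pending token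
theorem pvMain_lemma (n : Nat) : ∀ cs : List Char, cs.length ≤ n → ∀ (out tok : List Char),
    pvFinA (List.foldl pvStepA (out, tok, none, false) cs) = out ++ pvGoB' tok cs := by
  induction n with
  | zero =>
    intro cs h out tok
    have : cs = [] := List.eq_nil_of_length_eq_zero (Nat.le_zero.mp h)
    subst this; simp [pvGoB', pvFinA, pvFlushA_eq]
  | succ n ih =>
    intro cs h out tok
    match cs with
    | [] => simp [pvGoB', pvFinA, pvFlushA_eq]
    | c :: rest =>
      simp only [List.foldl_cons, pvStepA]
      by_cases hq : c = '\'' ∨ c = '"'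
      · simp only [if_pos hq]
        have hlen : rest.length ≤ n := by simp at h; omega
        have hstr := pvStr_lemma n rest hlen (pvFlushA out tok ++ [c]) [] c
        rw [hstr]
        have hlen2 : (pvScanStrB c rest).2.length ≤ n :=
          le_trans (pvScanStrB_snd_le c rest) hlen
        rw [ih _ hlen2]
        rw [pvGoB']
        simp [hq, pvFlushA_eq, List.append_assoc]
      · by_cases hw : (PySem.Chars.isalnum c || c = '_') = true
        · simp only [if_neg hq, if_pos hw]
          have hlen : rest.length ≤ n := by simp at h; omega
          rw [ih rest hlen out (tok ++ [c])]
          rw [pvGoB']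
          simp [hq, pvWordB, hw]
        · simp only [if_neg hq, if_neg hw]
          have hlen : rest.length ≤ n := by simp at h; omega
          rw [ih rest hlen (pvFlushA out tok ++ [c]) []]
          rw [pvGoB']
          simp [hq, pvWordB, hw, pvFlushA_eq, List.append_assoc]

-- pvGoB' with a pending token: flush the token extended by the leading word run, continue on the rest
theorem pvGoB'_span (n : Nat) : ∀ cs : List Char, cs.length ≤ n → ∀ tok : List Char,
    pvGoB' tok cs = pvReplB' (tok ++ cs.takeWhile pvWordB) ++ pvGoB' [] (cs.dropWhile pvWordB) := by
  induction n with
  | zero =>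
    intro cs h tok
    have : cs = [] := List.eq_nil_of_length_eq_zero (Nat.le_zero.mp h)
    subst this; simp [pvGoB', pvReplB']
  | succ n ih =>
    intro cs h tok
    match cs with
    | [] => simp [pvGoB', pvReplB']
    | c :: rest =>
      by_cases hw : pvWordB c = true
      · have hq : ¬ (c = '\'' ∨ c = '"') := by
          rintro (rfl | rfl) <;> simp [pvWordB, PySem.Chars.isalnum, PySem.Chars.isalpha,
            PySem.Chars.isdigit, PySem.Chars.isupper, PySem.Chars.islower] at hw
        rw [pvGoB']
        simp only [if_neg hq, if_pos hw]
        have hlen : rest.length ≤ n := by simp at h; omega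
        rw [ih rest hlen (tok ++ [c])]
        rw [List.takeWhile_cons_of_pos hw, List.dropWhile_cons_of_pos hw]
        simp [List.append_assoc]
      · rw [List.takeWhile_cons_of_neg (by simp_all), List.dropWhile_cons_of_neg (by simp_all)]
        have hnil : pvGoB' ([] : List Char) (c :: rest) = pvReplB' [] ++ pvGoB' [] (c :: rest) := by
          simp [pvReplB']
        by_cases hq : c = '\'' ∨ c = '"'
        · rw [pvGoB', pvGoB']
          simp [hq, pvReplB']
        · rw [pvGoB', pvGoB']
          simp [hq, hw, pvReplB']

theorem pvGoB'_nil_eq (n : Nat) : ∀ cs : List Char, cs.length ≤ n → pvGoB' [] cs = pvGoB cs := by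
  induction n with
  | zero =>
    intro cs h
    have : cs = [] := List.eq_nil_of_length_eq_zero (Nat.le_zero.mp h)
    subst this; simp [pvGoB', pvGoB, pvReplB']
  | succ n ih =>
    intro cs h
    match cs with
    | [] => simp [pvGoB', pvGoB, pvReplB']
    | c :: rest =>
      have hlen : rest.length ≤ n := by simp at h; omega
      by_cases hq : c = '\'' ∨ c = '"'
      · rw [pvGoB', pvGoB]
        simp only [if_pos hq]
        have hlen2 : (pvScanStrB c rest).2.length ≤ n :=
          le_trans (pvScanStrB_snd_le c rest) hlen
        rw [ih _ hlen2]
        simp [pvReplB']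
      · by_cases hw : pvWordB c = true
        · rw [pvGoB'_span (n+1) (c :: rest) h []]
          rw [pvGoB]
          simp only [if_neg hq, if_pos hw]
          rw [List.takeWhile_cons_of_pos hw, List.dropWhile_cons_of_pos hw]
          have hlen2 : (rest.dropWhile pvWordB).length ≤ n :=
            le_trans (rest.length_dropWhile_le pvWordB) hlen
          rw [ih _ hlen2]
          simp [pvReplB']
        · rw [pvGoB', pvGoB]
          simp only [if_neg hq, if_neg hw]
          rw [ih rest hlen]
          simp [pvReplB']

-- ===== VERDICT (by name: the statement is the Claim_ definition above) =====
theorem normalize_js_literal_py_spec : Claim_equal_normalize_js_literal_py := by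
  intro text _
  unfold Spec_normalize_js_literal_py normalize_js_literal_py normalize_js_literal_py_alt
  have h := pvMain_lemma text.toList.length text.toList le_rfl [] []
  have h2 := pvGoB'_nil_eq text.toList.length text.toList le_rfl
  simp only [pvFinA] at h
  simp [h, h2]
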